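-- pv_equiv track=rewrite | github.com/AtlantixJJ/KLiSH | models/helper.py | auto_layer_selection
-- ===== SOURCE A (Python) =====
-- def auto_layer_selection(shapes):
--     """Automatically select the features used in clustering."""
--     layers = []
--     for i in range(len(shapes) - 1):
--         if shapes[i][2] < shapes[i + 1][2]:
--             layers.append(i)
--     if shapes[-1][2] > shapes[layers[-1]][2]:
--         layers.append(len(shapes) - 1)
--     while sum([shapes[l][1] for l in layers]) > 1000:
--         del layers[0]
--     return layers
-- ===== SOURCE B (Python) =====
-- def auto_layer_selection(shapes):
--     """Automatically select the features used in clustering."""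
--     layers = [i for i in range(len(shapes) - 1)
--               if shapes[i][2] < shapes[i + 1][2]]
--     if shapes[-1][2] > shapes[layers[-1]][2]:
--         layers.append(len(shapes) - 1)
--     total = sum(shapes[l][1] for l in layers)
--     j = 0
--     while total > 1000:
--         total -= shapes[layers[j]][1]
--         j += 1
--     return layers[j:]
-- ===== Notes on version B (the rewrite author's own statement) =====
-- stated objective: faster
-- what changed: Replaces the quadratic trim loop (re-summing the whole remaining list and deleting the front element each iteration) with a single running-total front-to-back pass that computes the cut index once and returns a slice; the candidate list is built by a comprehension instead of an append loop.
import Mathlib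
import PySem

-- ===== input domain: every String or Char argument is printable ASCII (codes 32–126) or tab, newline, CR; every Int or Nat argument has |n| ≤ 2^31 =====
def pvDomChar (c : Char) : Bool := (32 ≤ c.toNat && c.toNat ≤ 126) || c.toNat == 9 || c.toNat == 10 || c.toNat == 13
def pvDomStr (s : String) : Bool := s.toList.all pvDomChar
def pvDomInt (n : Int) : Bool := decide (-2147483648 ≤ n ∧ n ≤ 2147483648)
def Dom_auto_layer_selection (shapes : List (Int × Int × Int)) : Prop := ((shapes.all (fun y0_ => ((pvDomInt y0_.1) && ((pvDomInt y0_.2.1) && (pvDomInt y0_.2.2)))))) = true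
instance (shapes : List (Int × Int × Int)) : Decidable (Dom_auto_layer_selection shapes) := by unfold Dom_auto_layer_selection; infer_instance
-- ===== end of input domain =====

-- B replaces A's quadratic trim loop (re-sum + del layers[0]) by a one-pass running-total cut; faster.

-- ===== PORT A =====
-- while sum([shapes[l][1] for l in layers]) > 1000: del layers[0]
-- (indices in `layers` are always in range, so the .getD default is never read)
def pvWhileA (shapes : List (Int × Int × Int)) : List Int → List Int
  | [] => []
  | l :: rest =>
    if ((l :: rest).map (fun j => ((PySem.List.pyGet? shapes j).getD (0,0,0)).2.1)).sum > 1000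
    then pvWhileA shapes rest else l :: rest

def auto_layer_selection (shapes : List (Int × Int × Int)) : List Int :=
  let layers := (PySem.List.pyRange 0 ((shapes.length : Int) - 1) 1).foldl
    (fun acc i =>
      if ((PySem.List.pyGet? shapes i).getD (0,0,0)).2.2 <
         ((PySem.List.pyGet? shapes (i+1)).getD (0,0,0)).2.2
      then acc ++ [i] else acc) []
  let layers :=
    if ((PySem.List.pyGet? shapes (-1)).getD (0,0,0)).2.2 >
       ((PySem.List.pyGet? shapes ((PySem.List.pyGet? layers (-1)).getD 0)).getD (0,0,0)).2.2
    then layers ++ [(shapes.length : Int) - 1] else layers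
  pvWhileA shapes layers

-- ===== PORT B =====
def pvChan (shapes : List (Int × Int × Int)) (l : Int) : Int :=
  ((PySem.List.pyGet? shapes l).getD (0,0,0)).2.2

def pvWidth (shapes : List (Int × Int × Int)) (l : Int) : Int :=
  ((PySem.List.pyGet? shapes l).getD (0,0,0)).2.1

-- j = 0; while total > 1000: total -= shapes[layers[j]][1]; j += 1; return layers[j:]
-- ported as a recursion on the suffix layers[j:]
def pvCut (shapes : List (Int × Int × Int)) : Int → List Int → List Int
  | _, [] => []
  | total, l :: rest =>
    if total > 1000 then pvCut shapes (total - pvWidth shapes l) rest else l :: rest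

def auto_layer_selection_alt (shapes : List (Int × Int × Int)) : List Int :=
  let layers := (PySem.List.pyRange 0 ((shapes.length : Int) - 1) 1).filter
    (fun i => pvChan shapes i < pvChan shapes (i+1))
  let layers :=
    if pvChan shapes (-1) > pvChan shapes ((PySem.List.pyGet? layers (-1)).getD 0)
    then layers ++ [(shapes.length : Int) - 1] else layers
  pvCut shapes ((layers.map (pvWidth shapes)).sum) layers

-- ===== PRECONDITION & SPEC =====
-- Pre_ excludes exactly the inputs where A raises IndexError: empty `shapes` (shapes[-1])
-- or no strictly increasing adjacent pair of widths, so `layers` is empty (layers[-1]).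
def Pre_auto_layer_selection (shapes : List (Int × Int × Int)) : Prop :=
  shapes ≠ [] ∧ ∃ i ∈ List.range (shapes.length - 1),
    (shapes.getD i (0,0,0)).2.2 < (shapes.getD (i+1) (0,0,0)).2.2
instance (shapes : List (Int × Int × Int)) : Decidable (Pre_auto_layer_selection shapes) := by
  unfold Pre_auto_layer_selection; infer_instance

def pvWitness_auto_layer_selection : (List (Int × Int × Int)) := [(1,1,1),(1,1,2)]

def Spec_auto_layer_selection (shapes : List (Int × Int × Int)) (out : List Int) : Prop := out = auto_layer_selection_alt shapes
instance (shapes : List (Int × Int × Int)) (out : List Int) : Decidable (Spec_auto_layer_selection shapes out) := by unfold Spec_auto_layer_selection; infer_instance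

-- ===== CLAIM (what is proved, stated in full; the proofs are below) =====
def Claim_equal_auto_layer_selection : Prop := ∀ (shapes : List (Int × Int × Int)), Dom_auto_layer_selection shapes → Pre_auto_layer_selection shapes → Spec_auto_layer_selection shapes (auto_layer_selection shapes)

-- ===== LEMMAS AND PROOFS =====

-- B's running-total cut equals A's re-summing del loop when started with the full sum.
lemma pvCut_eq_pvWhileA (shapes : List (Int × Int × Int)) :
    ∀ ls : List Int, pvCut shapes ((ls.map (pvWidth shapes)).sum) ls = pvWhileA shapes ls := by
  intro ls
  induction ls with
  | nil => rfl
  | cons l rest ih =>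
    by_cases h : ((l :: rest).map (fun j => ((PySem.List.pyGet? shapes j).getD (0,0,0)).2.1)).sum > 1000
    · rw [pvWhileA, if_pos h, pvCut]
      have hc : ((l :: rest).map (pvWidth shapes)).sum > 1000 := h
      rw [if_pos hc]
      have : ((l :: rest).map (pvWidth shapes)).sum - pvWidth shapes l
           = ((rest.map (pvWidth shapes)).sum) := by simp
      rw [this, ih]
    · rw [pvWhileA, if_neg h, pvCut]
      have hc : ¬ ((l :: rest).map (pvWidth shapes)).sum > 1000 := h
      rw [if_neg hc]

-- A's append loop builds the same candidate list as B's comprehension.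
lemma build_eq (shapes : List (Int × Int × Int)) :
    (PySem.List.pyRange 0 ((shapes.length : Int) - 1) 1).foldl
      (fun acc i =>
        if ((PySem.List.pyGet? shapes i).getD (0,0,0)).2.2 <
           ((PySem.List.pyGet? shapes (i+1)).getD (0,0,0)).2.2
        then acc ++ [i] else acc) []
    = (PySem.List.pyRange 0 ((shapes.length : Int) - 1) 1).filter
        (fun i => pvChan shapes i < pvChan shapes (i+1)) := by
  rw [PySem.List.foldl_append_ite_eq_filter]
  simp only [pvChan, List.nil_append]
  rfl

-- ===== VERDICT (by name: the statement is the Claim_ definition above) =====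
theorem auto_layer_selection_spec : Claim_equal_auto_layer_selection := by
  intro shapes _ _
  unfold Spec_auto_layer_selection auto_layer_selection auto_layer_selection_alt
  rw [build_eq]
  simp only [pvChan]
  rw [pvCut_eq_pvWhileA]
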